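-- pv_equiv track=rewrite | github.com/ckarczewski/MTO_Laby | lab7/main.py | hex_change
-- ===== SOURCE A (Python) =====
-- def hex_change(param):
--     num = int(param)
--     result = hex(num)
--
--     params = str(result[2:])
--     new_param = ""
--
--     for par in params:
--         if par.isdigit():
--             new_param = new_param + par
--         elif par == "a":
--             par = "g"
--             new_param = new_param + par
--         elif par == "b":
--             par = "h"
--             new_param = new_param + par
--         elif par == "c":
--             par = "i"
--             new_param = new_param + par
--         elif par == "d":
--             par = "j"
--             new_param = new_param + par
--         elif par == "e":
--             par = "k"
--             new_param = new_param + par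
--         elif par == "f":
--             par = "l"
--             new_param = new_param + par
--
--     return new_param
-- ===== SOURCE B (Python) =====
-- def hex_change(param):
--     num = int(param)
--     n = abs(num)
--     if n == 0:
--         return "0"
--     out = []
--     while n:
--         d = n % 16
--         out.append(str(d) if d < 10 else chr(ord('g') + d - 10))
--         n //= 16
--     return "".join(reversed(out))
-- ===== Notes on version B (the rewrite author's own statement) =====
-- stated objective: simpler
-- what changed: B builds the hex digits itself by repeated division (n%16 mapped inline to 0-9/g-l, n//=16, then reversed) on abs(num), instead of calling hex(), slicing off the prefix and re-mapping each character through an if/elif chain.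
import Mathlib
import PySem

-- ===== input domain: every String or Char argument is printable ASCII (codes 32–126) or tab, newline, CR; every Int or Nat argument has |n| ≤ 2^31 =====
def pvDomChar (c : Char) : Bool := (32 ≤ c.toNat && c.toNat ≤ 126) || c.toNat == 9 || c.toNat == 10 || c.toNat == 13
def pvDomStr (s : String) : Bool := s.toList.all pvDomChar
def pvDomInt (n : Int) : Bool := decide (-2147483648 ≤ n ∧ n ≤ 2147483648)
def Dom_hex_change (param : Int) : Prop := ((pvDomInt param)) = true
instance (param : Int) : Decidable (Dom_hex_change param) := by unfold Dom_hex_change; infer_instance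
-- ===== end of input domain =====

-- B replaces A's hex()+slice+if/elif remapping by direct repeated division with an inline digit map; same cost (objective: simpler).

-- ===== PORT A =====
-- hand port of Python's hex() builtin: exact on all Int (sign, '0x' prefix, lowercase digits)
def pvHexDigitChar (v : Nat) : Char :=
  if v < 10 then Char.ofNat (48 + v) else Char.ofNat (87 + v)

def pvHexDigitsA : Nat → List Char
  | 0 => []
  | (n+1) => pvHexDigitsA ((n+1) / 16) ++ [pvHexDigitChar ((n+1) % 16)]
decreasing_by exact Nat.div_lt_self (Nat.succ_pos n) (by omega)

def pvHexChars (num : Int) : List Char :=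
  if num < 0 then '-' :: '0' :: 'x' :: pvHexDigitsA num.natAbs
  else if num = 0 then ['0', 'x', '0']
  else '0' :: 'x' :: pvHexDigitsA num.natAbs

-- one iteration of A's for-loop (branches in A's order; string as List Char)
def pvStepA (acc : List Char) (c : Char) : List Char :=
  if PySem.Chars.isdigit c then acc ++ [c]
  else if c = 'a' then acc ++ ['g']
  else if c = 'b' then acc ++ ['h']
  else if c = 'c' then acc ++ ['i']
  else if c = 'd' then acc ++ ['j']
  else if c = 'e' then acc ++ ['k']
  else if c = 'f' then acc ++ ['l']
  else acc

def hex_change (param : Int) : String :=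
  let num := param
  let result := pvHexChars num
  let params := PySem.List.slice result (some 2) none   -- result[2:]
  String.ofList (params.foldl pvStepA [])

-- ===== PORT B =====
def pvDigitB (v : Nat) : Char :=
  if v < 10 then Char.ofNat (48 + v) else Char.ofNat (103 + v - 10)

def pvDigitsB : Nat → List Char          -- B's while-loop, digits in loop (little-endian) order
  | 0 => []
  | (n+1) => pvDigitB ((n+1) % 16) :: pvDigitsB ((n+1) / 16)
decreasing_by exact Nat.div_lt_self (Nat.succ_pos n) (by omega)

def hex_change_alt (param : Int) : String :=
  let n := param.natAbs
  if n = 0 then "0" else String.ofList (pvDigitsB n).reverse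

-- ===== PRECONDITION & SPEC =====
def Spec_hex_change (param : Int) (out : String) : Prop := out = hex_change_alt param
instance (param : Int) (out : String) : Decidable (Spec_hex_change param out) := by unfold Spec_hex_change; infer_instance

-- ===== CLAIM (what is proved, stated in full; the proofs are below) =====
def Claim_equal_hex_change : Prop := ∀ (param : Int), Dom_hex_change param → Spec_hex_change param (hex_change param)

-- ===== LEMMAS AND PROOFS =====
theorem pv_drop2 (l : List Char) : PySem.List.slice l (some 2) none = l.drop 2 := by
  simp [PySem.List.slice]
  by_cases h : 2 ≤ l.length
  · rw [Nat.min_eq_left h, List.take_of_length_le (by simp)]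
  · have h2 : min 2 l.length = l.length := by omega
    have h3 : l.drop 2 = [] := List.drop_eq_nil_of_le (by omega)
    simp [h2, h3]

theorem pvStepA_hexDigit (v : Nat) (h : v < 16) (acc : List Char) :
    pvStepA acc (pvHexDigitChar v) = acc ++ [pvDigitB v] := by
  interval_cases v <;> simp [pvStepA, pvHexDigitChar, pvDigitB, PySem.Chars.isdigit]

theorem pvStepA_x (acc : List Char) : pvStepA acc 'x' = acc := by
  simp [pvStepA, PySem.Chars.isdigit]

theorem pvFold_eq (n : Nat) : ∀ acc, (pvHexDigitsA n).foldl pvStepA acc = acc ++ (pvDigitsB n).reverse := by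
  induction n using Nat.strong_induction_on with
  | _ n ih =>
    intro acc
    match n with
    | 0 => simp [pvHexDigitsA, pvDigitsB]
    | (m+1) =>
      rw [pvHexDigitsA, pvDigitsB, List.foldl_append,
        ih ((m+1) / 16) (Nat.div_lt_self (Nat.succ_pos m) (by omega)) acc]
      simp [pvStepA_hexDigit ((m+1) % 16) (Nat.mod_lt _ (by omega))]

-- ===== VERDICT (by name: the statement is the Claim_ definition above) =====
theorem hex_change_spec : Claim_equal_hex_change := by
  intro param _
  unfold Spec_hex_change hex_change hex_change_alt pvHexChars
  rcases lt_trichotomy param 0 with h | h | h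
  · have hne : param.natAbs ≠ 0 := by omega
    simp only [if_pos h, hne, ite_false, pv_drop2, List.drop_succ_cons, List.drop_zero,
      List.foldl_cons, pvStepA_x, pvFold_eq]
    simp
  · subst h; decide
  · have hne : param.natAbs ≠ 0 := by omega
    have h0 : ¬ param < 0 := by omega
    have h1 : param ≠ 0 := by omega
    simp only [if_neg h0, if_neg h1, hne, ite_false, pv_drop2, List.drop_succ_cons,
      List.drop_zero, pvFold_eq]
    simp
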